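-- pv_equiv track=rewrite | github.com/jonp69/ImageAI | Old_Code/combined_code.py | find_similar_images
-- ===== SOURCE A (Python) =====
-- from typing import Dict
-- from typing import Dict, List
-- from typing import Dict, List, Optional
-- from typing import Dict, Set, List
-- from typing import List, Dict
-- from typing import List, Tuple
--
-- def find_similar_images(metadata: Dict[str, dict], target_tags: List[str], top_n: int = 10) -> List[str]:
--     scores = []
--     for path, info in metadata.items():
--         tags = set(info.get("predicted_tags", {}).keys())
--         score = len(set(target_tags) & tags)
--         if score > 0:
--             scores.append((path, score))
--     scores.sort(key=lambda x: -x[1])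
--     return [path for path, _ in scores[:top_n]]
-- ===== SOURCE B (Python) =====
-- def find_similar_images(metadata, target_tags, top_n=10):
--     targets = set(target_tags)
--     buckets = [[] for _ in range(len(targets) + 1)]
--     for path, info in metadata.items():
--         preds = info.get("predicted_tags", {})
--         score = sum(1 for t in targets if t in preds)
--         if score:
--             buckets[score].append(path)
--     result = []
--     for bucket in reversed(buckets):
--         result.extend(bucket)
--     return result[:top_n]
-- ===== Notes on version B (the rewrite author's own statement) =====
-- stated objective: alternative
-- what changed: Replaces the comparison sort over (path, score) pairs by a counting/bucket pass: scores are bucketed by value (range bounded by the number of distinct target tags, with the target set hoisted out of the loop) and the buckets are emitted from highest score down, which reproduces the stable descending order without sorting.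
import Mathlib
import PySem

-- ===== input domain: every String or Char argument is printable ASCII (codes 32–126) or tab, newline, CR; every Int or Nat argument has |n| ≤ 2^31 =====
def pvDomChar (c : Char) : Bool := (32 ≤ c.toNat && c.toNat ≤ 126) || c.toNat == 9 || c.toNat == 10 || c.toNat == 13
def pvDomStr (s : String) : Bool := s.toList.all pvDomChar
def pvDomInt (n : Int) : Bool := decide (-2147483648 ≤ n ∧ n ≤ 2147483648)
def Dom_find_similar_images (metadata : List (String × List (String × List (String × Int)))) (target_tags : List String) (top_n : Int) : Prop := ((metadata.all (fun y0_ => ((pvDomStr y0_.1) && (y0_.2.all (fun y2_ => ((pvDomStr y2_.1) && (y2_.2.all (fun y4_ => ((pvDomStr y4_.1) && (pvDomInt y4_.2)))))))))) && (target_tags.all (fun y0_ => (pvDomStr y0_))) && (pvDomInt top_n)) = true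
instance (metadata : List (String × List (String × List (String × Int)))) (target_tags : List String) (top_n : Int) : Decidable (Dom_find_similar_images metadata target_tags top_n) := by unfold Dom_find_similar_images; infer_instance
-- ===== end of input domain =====

-- B replaces A's comparison sort of (path, score) pairs by a bucket pass over the bounded
-- score range (buckets emitted from highest score down); same return value, no speed claim.

-- ===== PORT A =====
def find_similar_images (metadata : List (String × List (String × List (String × Int)))) (target_tags : List String) (top_n : Int) : List String :=
  let scores : List (String × Int) := metadata.foldl (fun scores pi =>
    let tags : PySem.Set String := PySem.Set.ofList (PySem.Dict.keys ⟨PySem.Dict.getD ⟨pi.2⟩ "predicted_tags" []⟩)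
    let score : Int := PySem.Set.len (PySem.Set.inter (PySem.Set.ofList target_tags) tags)
    if score > 0 then scores ++ [(pi.1, score)] else scores) []
  (PySem.List.slice (PySem.List.sorted scores (fun x => -x.2) false) none (some top_n)).map (fun p => p.1)

-- ===== PORT B =====
def find_similar_images_alt (metadata : List (String × List (String × List (String × Int)))) (target_tags : List String) (top_n : Int) : List String :=
  let targets : PySem.Set String := PySem.Set.ofList target_tags
  let buckets0 : List (List String) := List.replicate (targets.length + 1) []
  let buckets : List (List String) := metadata.foldl (fun bs pi =>
    let preds : List (String × Int) := PySem.Dict.getD ⟨pi.2⟩ "predicted_tags" []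
    let score : Int := targets.foldl (fun c t => if PySem.Dict.contains ⟨preds⟩ t then c + 1 else c) 0
    if score ≠ 0 then PySem.List.pySetD bs score (PySem.List.pyGetD bs score [] ++ [pi.1]) else bs) buckets0
  let result : List String := buckets.reverse.foldl (fun acc b => acc ++ b) []
  PySem.List.slice result none (some top_n)

-- ===== PRECONDITION & SPEC =====
def Spec_find_similar_images (metadata : List (String × List (String × List (String × Int)))) (target_tags : List String) (top_n : Int) (out : List String) : Prop := out = find_similar_images_alt metadata target_tags top_n
instance (metadata : List (String × List (String × List (String × Int)))) (target_tags : List String) (top_n : Int) (out : List String) : Decidable (Spec_find_similar_images metadata target_tags top_n out) := by unfold Spec_find_similar_images; infer_instance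

-- ===== CLAIM (what is proved, stated in full; the proofs are below) =====
def Claim_equal_find_similar_images : Prop := ∀ (metadata : List (String × List (String × List (String × Int)))) (target_tags : List String) (top_n : Int), Dom_find_similar_images metadata target_tags top_n → Spec_find_similar_images metadata target_tags top_n (find_similar_images metadata target_tags top_n)

-- ===== LEMMAS AND PROOFS =====

-- the common score of one metadata entry (B's formulation)
def pvSc (target_tags : List String) (pi : String × List (String × List (String × Int))) : Int :=
  (PySem.Set.ofList target_tags).foldl
    (fun c t => if PySem.Dict.contains ⟨PySem.Dict.getD ⟨pi.2⟩ "predicted_tags" []⟩ t then c + 1 else c) 0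

-- what bucket j contains after B's pass over l
def pvBspec (target_tags : List String) (j : Nat) (l : List (String × List (String × List (String × Int)))) : List String :=
  (l.filter (fun pi => decide (pvSc target_tags pi = (j : Int)) && decide (j ≠ 0))).map (fun p => p.1)

-- concatenation of the score-groups of xs in the key order ks
def pvGk (ks : List Int) (xs : List (String × Int)) : List (String × Int) :=
  (ks.map (fun s => xs.filter (fun p => decide (p.2 = s)))).flatten

lemma pvSc_eq_countP (tt : List String) (pi : String × List (String × List (String × Int))) :
    pvSc tt pi = ((PySem.Set.ofList tt).countP
      (fun t => PySem.Dict.contains ⟨PySem.Dict.getD ⟨pi.2⟩ "predicted_tags" []⟩ t) : Int) := by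
  unfold pvSc
  rw [PySem.List.foldl_if_add_one]
  simp only [zero_add]

lemma pvSc_nonneg (tt : List String) (pi : String × List (String × List (String × Int))) :
    0 ≤ pvSc tt pi := by
  rw [pvSc_eq_countP]; positivity

lemma pvSc_le (tt : List String) (pi : String × List (String × List (String × Int))) :
    pvSc tt pi ≤ ((PySem.Set.ofList tt).length : Int) := by
  rw [pvSc_eq_countP]
  exact_mod_cast List.countP_le_length

-- A's set-intersection score equals B's membership-count score
lemma pv_score_eq (tt : List String) (pi : String × List (String × List (String × Int))) :
    PySem.Set.len (PySem.Set.inter (PySem.Set.ofList tt)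
      (PySem.Set.ofList (PySem.Dict.keys ⟨PySem.Dict.getD ⟨pi.2⟩ "predicted_tags" []⟩))) = pvSc tt pi := by
  rw [pvSc_eq_countP]
  unfold PySem.Set.len PySem.Set.inter
  rw [← List.countP_eq_length_filter]
  congr 1
  apply List.countP_congr
  intro x _
  rw [Bool.eq_iff_iff, PySem.Set.contains_iff, PySem.Set.mem_ofList]
  unfold PySem.Dict.keys PySem.Dict.contains PySem.Dict.items
  simp [List.any_eq_true, beq_iff_eq, List.mem_map]

-- A's accumulation loop as filter+map
lemma pv_scores_eq (tt : List String) (m : List (String × List (String × List (String × Int)))) :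
    m.foldl (fun scores pi =>
      if PySem.Set.len (PySem.Set.inter (PySem.Set.ofList tt) (PySem.Set.ofList (PySem.Dict.keys ⟨PySem.Dict.getD ⟨pi.2⟩ "predicted_tags" []⟩))) > 0
      then scores ++ [(pi.1, PySem.Set.len (PySem.Set.inter (PySem.Set.ofList tt) (PySem.Set.ofList (PySem.Dict.keys ⟨PySem.Dict.getD ⟨pi.2⟩ "predicted_tags" []⟩))))]
      else scores) [] =
    (m.filter (fun pi => decide (0 < pvSc tt pi))).map (fun pi => (pi.1, pvSc tt pi)) := by
  have h : (fun (scores : List (String × Int)) pi =>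
      if PySem.Set.len (PySem.Set.inter (PySem.Set.ofList tt) (PySem.Set.ofList (PySem.Dict.keys ⟨PySem.Dict.getD ⟨pi.2⟩ "predicted_tags" []⟩))) > 0
      then scores ++ [(pi.1, PySem.Set.len (PySem.Set.inter (PySem.Set.ofList tt) (PySem.Set.ofList (PySem.Dict.keys ⟨PySem.Dict.getD ⟨pi.2⟩ "predicted_tags" []⟩))))]
      else scores) =
      (fun scores pi => if 0 < pvSc tt pi then scores ++ [(pi.1, pvSc tt pi)] else scores) := by
    funext scores pi
    simp only [pv_score_eq tt pi, gt_iff_lt]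
  rw [h, PySem.List.foldl_append_ite (fun pi => 0 < pvSc tt pi) (fun pi => (pi.1, pvSc tt pi))]
  simp

-- insertBy walks past a prefix it is not 'before'
lemma pv_insertBy_append (bef : (String × Int) → (String × Int) → Bool) (x : String × Int)
    (A B : List (String × Int)) (h : ∀ a ∈ A, bef x a = false) :
    PySem.List.insertBy bef x (A ++ B) = A ++ PySem.List.insertBy bef x B := by
  induction A with
  | nil => simp
  | cons a A ih =>
    simp only [List.cons_append, PySem.List.insertBy, h a (by simp)]
    simp only [Bool.false_eq_true, if_false, List.cons.injEq, true_and]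
    exact ih (fun a ha => h a (by simp [ha]))

-- insertBy stops at the head if it is 'before' everything
lemma pv_insertBy_all (bef : (String × Int) → (String × Int) → Bool) (x : String × Int)
    (L : List (String × Int)) (h : ∀ b ∈ L, bef x b = true) :
    PySem.List.insertBy bef x L = x :: L := by
  cases L with
  | nil => simp [PySem.List.insertBy]
  | cons b L => simp [PySem.List.insertBy, h b (by simp)]

lemma pv_mem_Gk {p : String × Int} {ks : List Int} {ys : List (String × Int)}
    (h : p ∈ pvGk ks ys) : p.2 ∈ ks := by
  unfold pvGk at h
  simp only [List.mem_flatten, List.mem_map] at h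
  obtain ⟨g, ⟨s, hs, rfl⟩, hp⟩ := h
  rw [List.mem_filter] at hp
  have := hp.2
  simp only [decide_eq_true_eq] at this
  rwa [this]

-- inserting x into a descending group partition lands at the end of its own group
lemma pv_insert_Gk (x : String × Int) (ks : List Int) (ys : List (String × Int))
    (hks : ks.Pairwise (· > ·)) (hx : x.2 ∈ ks) :
    PySem.List.insertBy (fun a b => decide ((fun p : String × Int => -p.2) a < (fun p : String × Int => -p.2) b)) x (pvGk ks ys)
      = pvGk ks (ys ++ [x]) := by
  induction ks with
  | nil => simp at hx
  | cons s ks ih =>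
    have hgt : ∀ s' ∈ ks, s' < s := by
      intro s' hs'
      exact (List.pairwise_cons.mp hks).1 s' hs'
    have hGk_cons : ∀ zs : List (String × Int), pvGk (s :: ks) zs =
        zs.filter (fun p => decide (p.2 = s)) ++ pvGk ks zs := by
      intro zs; unfold pvGk; simp
    rw [hGk_cons ys, hGk_cons (ys ++ [x])]
    by_cases hxs : x.2 = s
    · have hF : ∀ a ∈ ys.filter (fun p => decide (p.2 = s)),
          (fun a b => decide ((fun p : String × Int => -p.2) a < (fun p : String × Int => -p.2) b)) x a = false := by
        intro a ha
        have := (List.mem_filter.mp ha).2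
        simp only [decide_eq_true_eq] at this
        simp only [decide_eq_false_iff_not]
        omega
      rw [pv_insertBy_append _ _ _ _ hF]
      have hall : ∀ b ∈ pvGk ks ys,
          (fun a b => decide ((fun p : String × Int => -p.2) a < (fun p : String × Int => -p.2) b)) x b = true := by
        intro b hb
        have hbk := pv_mem_Gk hb
        have := hgt _ hbk
        simp only [decide_eq_true_eq]
        omega
      rw [pv_insertBy_all _ _ _ hall]
      have h1 : (ys ++ [x]).filter (fun p => decide (p.2 = s)) =
          ys.filter (fun p => decide (p.2 = s)) ++ [x] := by
        rw [List.filter_append]; simp [hxs]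
      have h2 : pvGk ks (ys ++ [x]) = pvGk ks ys := by
        unfold pvGk
        congr 1
        apply List.map_congr_left
        intro s' hs'
        rw [List.filter_append]
        have : x.2 ≠ s' := by have := hgt _ hs'; omega
        simp [this]
      rw [h1, h2]
      simp
    · have hxks : x.2 ∈ ks := by
        rcases List.mem_cons.mp hx with h | h
        · exact absurd h hxs
        · exact h
      have hxlt : x.2 < s := hgt _ hxks
      have hF : ∀ a ∈ ys.filter (fun p => decide (p.2 = s)),
          (fun a b => decide ((fun p : String × Int => -p.2) a < (fun p : String × Int => -p.2) b)) x a = false := by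
        intro a ha
        have := (List.mem_filter.mp ha).2
        simp only [decide_eq_true_eq] at this
        simp only [decide_eq_false_iff_not]
        omega
      rw [pv_insertBy_append _ _ _ _ hF]
      rw [ih (List.pairwise_cons.mp hks).2 hxks]
      have h1 : (ys ++ [x]).filter (fun p => decide (p.2 = s)) =
          ys.filter (fun p => decide (p.2 = s)) := by
        rw [List.filter_append]; simp [hxs]
      rw [h1]

-- stability: the stable sort by descending score is the group concatenation
lemma pv_sorted_eq_Gk (xs : List (String × Int)) (ks : List Int)
    (hks : ks.Pairwise (· > ·)) (hall : ∀ p ∈ xs, p.2 ∈ ks) :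
    PySem.List.sorted xs (fun p => -p.2) false = pvGk ks xs := by
  rw [PySem.List.sorted_eq_foldl_insertBy]
  induction xs using List.reverseRecOn with
  | nil => unfold pvGk; simp
  | append_singleton ys x ih =>
    rw [List.foldl_append, List.foldl_cons, List.foldl_nil]
    rw [ih (fun p hp => hall p (by simp [hp]))]
    exact pv_insert_Gk x ks ys hks (hall x (by simp))

-- B's bucket loop computes the per-score groups
lemma pv_buckets_eq (tt : List String) (m : List (String × List (String × List (String × Int)))) :
    m.foldl (fun bs pi =>
      if pvSc tt pi ≠ 0
      then PySem.List.pySetD bs (pvSc tt pi) (PySem.List.pyGetD bs (pvSc tt pi) [] ++ [pi.1])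
      else bs)
      (List.replicate ((PySem.Set.ofList tt).length + 1) []) =
    (List.range ((PySem.Set.ofList tt).length + 1)).map (fun j => pvBspec tt j m) := by
  induction m using List.reverseRecOn with
  | nil =>
    rw [List.foldl_nil]
    simp [pvBspec, List.map_const', List.length_range]
  | append_singleton l x ih =>
    rw [List.foldl_append, List.foldl_cons, List.foldl_nil, ih]
    have h0 := pvSc_nonneg tt x
    by_cases hz : pvSc tt x = 0
    · simp only [hz, ne_eq, not_true_eq_false, if_false]
      apply List.map_congr_left
      intro j _
      unfold pvBspec
      rw [List.filter_append]
      have hfx : (List.filter (fun pi => decide (pvSc tt pi = (j : Int)) && decide (j ≠ 0)) [x]) = [] := by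
        by_cases hj : j = 0
        · simp [hj]
        · have : ¬ (pvSc tt x = (j : Int)) := by omega
          simp [this]
      rw [hfx, List.append_nil]
    · have hcast : ((pvSc tt x).toNat : Int) = pvSc tt x := Int.toNat_of_nonneg h0
      have hle := pvSc_le tt x
      have hlt : (pvSc tt x).toNat < (PySem.Set.ofList tt).length + 1 := by omega
      simp only [hz, ne_eq, not_false_eq_true, if_true]
      rw [← hcast, PySem.List.pySetD_natCast, PySem.List.pyGetD_natCast]
      have hlen : ((List.range ((PySem.Set.ofList tt).length + 1)).map (fun j => pvBspec tt j l)).length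
          = (PySem.Set.ofList tt).length + 1 := by simp
      have hget : ((List.range ((PySem.Set.ofList tt).length + 1)).map (fun j => pvBspec tt j l)).getD
          (pvSc tt x).toNat [] = pvBspec tt (pvSc tt x).toNat l := by
        rw [List.getD_eq_getElem _ _ (by simpa [hlen] using hlt)]
        simp
      rw [hget]
      apply List.ext_getElem
      · simp
      · intro i h1 h2
        simp only [List.length_set, hlen] at h1
        rw [List.getElem_set]
        simp only [List.getElem_map, List.getElem_range]
        by_cases hij : (pvSc tt x).toNat = i
        · subst hij
          simp only [if_true]
          unfold pvBspec
          rw [List.filter_append]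
          have hfx : (List.filter (fun pi => decide (pvSc tt pi = ((pvSc tt x).toNat : Int)) && decide ((pvSc tt x).toNat ≠ 0)) [x]) = [x] := by
            have h1' : pvSc tt x = ((pvSc tt x).toNat : Int) := hcast.symm
            have h2' : (pvSc tt x).toNat ≠ 0 := by omega
            simp [← h1', h2']
          rw [hfx]
          simp
        · simp only [hij, if_false]
          unfold pvBspec
          rw [List.filter_append]
          have hfx : (List.filter (fun pi => decide (pvSc tt pi = (i : Int)) && decide (i ≠ 0)) [x]) = [] := by
            have : ¬ (pvSc tt x = (i : Int)) := by omega
            simp [this]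
          rw [hfx, List.append_nil]

-- the j-th group of A's scores list, projected to paths, is B's bucket j
lemma pv_group_eq (tt : List String) (m : List (String × List (String × List (String × Int)))) (j : Nat) :
    ((((m.filter (fun pi => decide (0 < pvSc tt pi))).map (fun pi => (pi.1, pvSc tt pi))).filter
      (fun p => decide (p.2 = (j : Int)))).map (fun p => p.1)) = pvBspec tt j m := by
  unfold pvBspec
  rw [List.filter_map, List.map_map, List.filter_filter]
  simp only [Function.comp]
  congr 1
  apply List.filter_congr
  intro pi _
  have h0 := pvSc_nonneg tt pi
  by_cases h : pvSc tt pi = (j : Int)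
  · by_cases hj : j = 0
    · subst hj; simp [h]
    · have hp : 0 < pvSc tt pi := by omega
      simp [h, hj]
      omega
  · simp [h]

-- slicing commutes with map (prefix slice)
lemma pv_slice_map {α β : Type} (f : α → β) (xs : List α) (t : Int) :
    (PySem.List.slice xs none (some t)).map f = PySem.List.slice (xs.map f) none (some t) := by
  unfold PySem.List.slice
  simp [List.map_take]

-- ===== VERDICT (by name: the statement is the Claim_ definition above) =====
theorem find_similar_images_spec : Claim_equal_find_similar_images := by
  intro m tt n _
  show find_similar_images m tt n = find_similar_images_alt m tt n
  simp only [find_similar_images, find_similar_images_alt]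
  rw [pv_scores_eq]
  show List.map (fun p => p.1) (PySem.List.slice (PySem.List.sorted (List.map (fun pi => (pi.1, pvSc tt pi)) (List.filter (fun pi => decide (0 < pvSc tt pi)) m)) (fun x => -x.2) false) none (some n)) =
    PySem.List.slice (List.foldl (fun acc b => acc ++ b) [] (List.foldl (fun bs pi => if pvSc tt pi ≠ 0 then PySem.List.pySetD bs (pvSc tt pi) (PySem.List.pyGetD bs (pvSc tt pi) [] ++ [pi.1]) else bs) (List.replicate ((PySem.Set.ofList tt).length + 1) []) m).reverse) none (some n)
  rw [pv_buckets_eq, pv_slice_map, PySem.List.foldl_append_eq_flatten, List.nil_append]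
  have h1 : (((List.range ((PySem.Set.ofList tt).length + 1)).reverse).map (fun (j : Nat) => (j : Int))).Pairwise (· > ·) := by
    apply List.Pairwise.map
    case H => intro a b h; exact_mod_cast h
    exact List.pairwise_reverse.mpr ((List.pairwise_lt_range (n := (PySem.Set.ofList tt).length + 1)).imp (fun h => h))
  have h2 : ∀ p ∈ (m.filter (fun pi => decide (0 < pvSc tt pi))).map (fun pi => (pi.1, pvSc tt pi)),
      p.2 ∈ (((List.range ((PySem.Set.ofList tt).length + 1)).reverse).map (fun (j : Nat) => (j : Int))) := by
    intro p hp
    simp only [List.mem_map, List.mem_filter, decide_eq_true_eq] at hp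
    obtain ⟨pi, ⟨_, hpos⟩, rfl⟩ := hp
    have hle := pvSc_le tt pi
    have hnn := pvSc_nonneg tt pi
    simp only [List.mem_map, List.mem_reverse, List.mem_range]
    exact ⟨(pvSc tt pi).toNat, by omega, Int.toNat_of_nonneg hnn⟩
  rw [pv_sorted_eq_Gk _ _ h1 h2]
  unfold pvGk
  rw [List.map_flatten, List.map_map, List.map_map, ← List.map_reverse]
  congr 1
  congr 1
  apply List.map_congr_left
  intro j _
  simp only [Function.comp]
  exact pv_group_eq tt m j
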